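-- pv_equiv track=rewrite | github.com/pallets/click | click.py | _parse_decls
-- ===== SOURCE A (Python) =====
-- def _parse_decls(decls):
--     opts = []
--     secondary_opts = []
--     name = None
--     possible_names = []
--
--     for decl in decls:
--         if not decl.startswith('-'):
--             if name is not None:
--                 raise TypeError('Name defined twice')
--             name = decl
--         else:
--             if '/' in decl:
--                 first, second = decl.split('/', 1)
--                 possible_names.append(first.lstrip('-'))
--                 opts.append(first)
--                 secondary_opts.append(second)
--             else:
--                 possible_names.append(decl.lstrip('-'))
--                 opts.append(decl)
--
--     if name is None and possible_names:
--         possible_names.sort(key=len)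
--         name = possible_names[-1]
--
--     if name is None:
--         raise TypeError('Could not determine name for option')
--
--     return name.replace('-', '_'), opts, secondary_opts
-- ===== SOURCE B (Python) =====
-- def _parse_decls(decls):
--     # Partition up front: positional names vs dash-prefixed option declarations.
--     names = [d for d in decls if not d.startswith('-')]
--     option_decls = [d for d in decls if d.startswith('-')]
--     if len(names) > 1:
--         raise TypeError('Name defined twice')
--
--     opts = []
--     secondary_opts = []
--     possible_names = []
--     for decl in option_decls:
--         pieces = decl.split('/', 1)
--         opts.append(pieces[0])
--         possible_names.append(pieces[0].lstrip('-'))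
--         if len(pieces) == 2:
--             secondary_opts.append(pieces[1])
--
--     if names:
--         name = names[0]
--     elif possible_names:
--         # last-of-longest tie-break: first maximum of the reversed list
--         name = max(reversed(possible_names), key=len)
--     else:
--         raise TypeError('Could not determine name for option')
--
--     return name.replace('-', '_'), opts, secondary_opts
-- ===== Notes on version B (the rewrite author's own statement) =====
-- stated objective: simpler
-- what changed: B partitions decls up front into positional names and option decls with comprehensions, handles every option decl uniformly via split('/',1) pieces with no '/'-membership branch, and replaces A's in-place sort(key=len) + [-1] indexing by max(reversed(possible_names), key=len) to get the same last-of-longest fallback name.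
import Mathlib
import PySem

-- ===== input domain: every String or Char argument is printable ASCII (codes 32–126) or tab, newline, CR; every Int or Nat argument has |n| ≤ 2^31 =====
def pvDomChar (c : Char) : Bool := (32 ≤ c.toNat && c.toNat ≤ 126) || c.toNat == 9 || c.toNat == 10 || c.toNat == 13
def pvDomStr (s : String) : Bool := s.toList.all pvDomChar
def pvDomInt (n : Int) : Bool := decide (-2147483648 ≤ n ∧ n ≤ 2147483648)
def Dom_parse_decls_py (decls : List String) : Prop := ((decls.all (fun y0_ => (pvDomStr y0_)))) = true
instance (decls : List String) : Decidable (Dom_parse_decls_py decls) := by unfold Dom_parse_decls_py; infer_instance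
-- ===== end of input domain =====

-- B replaces A's interleaved loop by an up-front partition into names/option decls, a
-- uniform split('/',1) pass, and max(reversed(...), key=len) instead of sort+[-1] (objective: simpler).

-- shared primitive helper: s.lstrip('-') — exact for the single strip character '-'
def pvLstripDash (s : String) : String := String.ofList (s.toList.dropWhile (fun c => c == '-'))

-- ===== PORT A =====
-- the for-loop of A; `none` = the TypeError raises (excluded by Pre_)
def parseLoopA : List String → List String → List String → Option String → List String →
    Option (List String × List String × Option String × List String)
  | [], opts, sec, name, poss => some (opts, sec, name, poss)
  | d :: rest, opts, sec, name, poss =>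
    if !(PySem.Str.startswith d "-") then
      match name with
      | some _ => none  -- raise TypeError('Name defined twice')
      | none => parseLoopA rest opts sec (some d) poss
    else if PySem.Str.isIn "/" d then
      match PySem.Str.splitMax? d "/" 1 with
      | some (first :: second :: _) =>
          parseLoopA rest (opts ++ [first]) (sec ++ [second]) name (poss ++ [pvLstripDash first])
      | _ => none  -- unreachable: '/' in decl guarantees two pieces
    else parseLoopA rest (opts ++ [d]) sec name (poss ++ [pvLstripDash d])

def parse_decls_py (decls : List String) : String × List String × List String :=
  match parseLoopA decls [] [] none [] with
  | none => ("", [], [])  -- TypeError('Name defined twice'); excluded by Pre_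
  | some (opts, sec, name, poss) =>
    let name' : Option String :=
      match name with
      | some n => some n
      | none =>
        if poss.isEmpty then none
        else PySem.List.pyGet? (PySem.List.sorted poss (fun s => PySem.Str.len s) false) (-1)
    match name' with
    | some n => (PySem.Str.replace n "-" "_", opts, sec)
    | none => ("", [], [])  -- raise TypeError('Could not determine name for option'); excluded by Pre_

-- ===== PORT B =====
-- B's loop body over one option decl: pieces = decl.split('/', 1)
def pvStepB (st : List String × List String × List String) (d : String) :
    List String × List String × List String :=
  match PySem.Str.splitMax? d "/" 1 with
  | some [p0] => (st.1 ++ [p0], st.2.1, st.2.2 ++ [pvLstripDash p0])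
  | some [p0, p1] => (st.1 ++ [p0], st.2.1 ++ [p1], st.2.2 ++ [pvLstripDash p0])
  | _ => st  -- unreachable: split('/', 1) yields one or two pieces

def parse_decls_py_alt (decls : List String) : String × List String × List String :=
  let names := decls.filter (fun d => !(PySem.Str.startswith d "-"))
  if names.length > 1 then ("", [], [])  -- raise TypeError('Name defined twice'); excluded by Pre_
  else
    let optionDecls := decls.filter (fun d => PySem.Str.startswith d "-")
    let st := optionDecls.foldl pvStepB ([], [], [])
    let name? : Option String :=
      match names with
      | n :: _ => some n
      | [] => PySem.List.max? st.2.2.reverse (fun s => PySem.Str.len s)  -- max(reversed(...), key=len)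
    match name? with
    | some n => (PySem.Str.replace n "-" "_", st.1, st.2.1)
    | none => ("", [], [])  -- raise TypeError('Could not determine name for option'); excluded by Pre_

-- ===== PRECONDITION & SPEC =====
-- Pre_ excludes exactly the inputs where A raises TypeError: more than one positional name,
-- or no decl at all (then no name can be determined).
def Pre_parse_decls_py (decls : List String) : Prop :=
  decls ≠ [] ∧ (decls.filter (fun d => !(PySem.Str.startswith d "-"))).length ≤ 1
instance (decls : List String) : Decidable (Pre_parse_decls_py decls) := by
  unfold Pre_parse_decls_py; infer_instance

def pvWitness_parse_decls_py : List String := ["--foo/--no-foo", "-x"]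

def Spec_parse_decls_py (decls : List String) (out : String × List String × List String) : Prop :=
  out = parse_decls_py_alt decls
instance (decls : List String) (out : String × List String × List String) :
    Decidable (Spec_parse_decls_py decls out) := by unfold Spec_parse_decls_py; infer_instance

-- ===== CLAIM (what is proved, stated in full; the proofs are below) =====
def Claim_equal_parse_decls_py : Prop :=
  ∀ (decls : List String), Dom_parse_decls_py decls → Pre_parse_decls_py decls →
    Spec_parse_decls_py decls (parse_decls_py decls)

-- ===== LEMMAS AND PROOFS =====

-- proof-side closed forms for what both loops emit per '-'-decl
def pvFst (d : String) : String := String.ofList (d.toList.takeWhile (fun c => !(c == '/')))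
def pvSnd (d : String) : String := String.ofList ((d.toList.dropWhile (fun c => !(c == '/'))).tail)
def pvOptsOf (l : List String) : List String := l.map pvFst
def pvSecOf (l : List String) : List String :=
  l.filterMap (fun d => if '/' ∈ d.toList then some (pvSnd d) else none)
def pvPossOf (l : List String) : List String := l.map (fun d => pvLstripDash (pvFst d))

theorem pv_isIn_slash (d : String) : PySem.Str.isIn "/" d = true ↔ '/' ∈ d.toList := by
  rw [PySem.Str.isIn_iff_infix]
  constructor
  · intro h
    exact h.sublist.subset (by simp)
  · intro h
    obtain ⟨s, t, hst⟩ := List.append_of_mem h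
    exact ⟨s, t, by simp [hst]⟩

theorem pv_go_zero (fuel : Nat) (l cur : List Char) (acc : List (List Char)) :
    PySem.Chars.splitOnMax.go ['/'] fuel 0 l cur acc = ((cur.reverse ++ l) :: acc).reverse := by
  cases fuel with
  | zero => simp [PySem.Chars.splitOnMax.go]
  | succ f => cases l <;> simp [PySem.Chars.splitOnMax.go]

theorem pv_go_one (l : List Char) : ∀ (fuel : Nat) (cur : List Char) (acc : List (List Char)),
    l.length < fuel →
    PySem.Chars.splitOnMax.go ['/'] fuel 1 l cur acc =
      acc.reverse ++ [cur.reverse ++ l.takeWhile (fun c => !(c == '/'))] ++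
        (if '/' ∈ l then [(l.dropWhile (fun c => !(c == '/'))).tail] else []) := by
  induction l with
  | nil =>
    intro fuel cur acc hf
    cases fuel with
    | zero => omega
    | succ f => simp [PySem.Chars.splitOnMax.go]
  | cons c rest ih =>
    intro fuel cur acc hf
    cases fuel with
    | zero => omega
    | succ f =>
      by_cases hc : c = '/'
      · subst hc
        simp only [PySem.Chars.splitOnMax.go, List.isPrefixOf, BEq.rfl, Bool.true_and]
        simp [pv_go_zero]
      · have hpre : List.isPrefixOf ['/'] (c :: rest) = false := by
          simp [List.isPrefixOf]
          exact fun h => hc h.symm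
        simp only [PySem.Chars.splitOnMax.go, hpre]
        rw [ih f (c :: cur) acc (by simpa using Nat.lt_of_succ_lt_succ hf)]
        have hcb : (!(c == '/')) = true := by simp [hc]
        simp [hcb, Ne.symm hc]

theorem pv_splitMax1_chars (cs : List Char) :
    PySem.Chars.splitMax? cs ['/'] 1 =
      some ((cs.takeWhile (fun c => !(c == '/'))) ::
        (if '/' ∈ cs then [(cs.dropWhile (fun c => !(c == '/'))).tail] else [])) := by
  simp only [PySem.Chars.splitMax?, PySem.Chars.splitOnMax]
  norm_num
  rw [pv_go_one cs (cs.length + 1) [] [] (by omega)]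
  simp

theorem pv_splitMax1_str (d : String) :
    PySem.Str.splitMax? d "/" 1 =
      some (pvFst d :: (if '/' ∈ d.toList then [pvSnd d] else [])) := by
  have h : ("/" : String).toList = ['/'] := rfl
  simp only [PySem.Str.splitMax?, h, pv_splitMax1_chars]
  by_cases hm : '/' ∈ d.toList <;> simp [hm, pvFst, pvSnd]

theorem pv_fst_no_slash (d : String) (h : '/' ∉ d.toList) : pvFst d = d := by
  unfold pvFst
  rw [List.takeWhile_eq_self_iff.mpr ?_, String.ofList_toList]
  intro c hc
  simp only [Bool.not_eq_eq_eq_not, Bool.not_true, beq_eq_false_iff_ne, ne_eq]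
  exact fun hcs => h (hcs ▸ hc)

-- B's fold in closed form
theorem pv_foldB (l : List String) : ∀ (opts sec poss : List String),
    l.foldl pvStepB (opts, sec, poss) =
      (opts ++ pvOptsOf l, sec ++ pvSecOf l, poss ++ pvPossOf l) := by
  induction l with
  | nil => intro opts sec poss; simp [pvOptsOf, pvSecOf, pvPossOf]
  | cons d rest ih =>
    intro opts sec poss
    by_cases hm : '/' ∈ d.toList <;>
      simp [pvStepB, pv_splitMax1_str, hm, ih, pvOptsOf, pvSecOf, pvPossOf]

-- A's loop in closed form (under: at most one positional name remains admissible)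
theorem pv_loopA (ds : List String) : ∀ (opts sec : List String) (name : Option String)
    (poss : List String),
    (name.elim 0 (fun _ => 1)) + ds.countP (fun d => !(PySem.Str.startswith d "-")) ≤ 1 →
    parseLoopA ds opts sec name poss =
      some (opts ++ pvOptsOf (ds.filter (fun d => PySem.Str.startswith d "-")),
            sec ++ pvSecOf (ds.filter (fun d => PySem.Str.startswith d "-")),
            (match name with
             | some n => some n
             | none => (ds.filter (fun d => !(PySem.Str.startswith d "-"))).head?),
            poss ++ pvPossOf (ds.filter (fun d => PySem.Str.startswith d "-"))) := by
  induction ds with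
  | nil =>
    intro opts sec name poss _
    cases name <;> simp [parseLoopA, pvOptsOf, pvSecOf, pvPossOf]
  | cons d rest ih =>
    intro opts sec name poss h
    rw [List.countP_cons] at h
    by_cases hd : PySem.Str.startswith d "-"
    · have hdc : PySem.Chars.startswith d.toList ['-'] = true := by simpa using hd
      have hd' : (!(PySem.Str.startswith d "-")) = false := by rw [hd]; rfl
      have h2 : (name.elim 0 (fun _ => 1)) +
          rest.countP (fun d => !(PySem.Str.startswith d "-")) ≤ 1 := by
        rw [hd'] at h
        simpa using h
      have hfd : List.filter (fun d => PySem.Str.startswith d "-") (d :: rest) =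
          d :: List.filter (fun d => PySem.Str.startswith d "-") rest :=
        List.filter_cons_of_pos hd
      have hfn : List.filter (fun d => !(PySem.Str.startswith d "-")) (d :: rest) =
          List.filter (fun d => !(PySem.Str.startswith d "-")) rest :=
        List.filter_cons_of_neg (by simp [hdc])
      by_cases hm : '/' ∈ d.toList
      · have hin : PySem.Str.isIn "/" d = true := (pv_isIn_slash d).mpr hm
        simp only [parseLoopA, hd', Bool.false_eq_true, if_false, hin, if_true,
          pv_splitMax1_str, hm]
        rw [ih _ _ _ _ h2, hfd, hfn]
        cases name <;>
          simp [pvOptsOf, pvSecOf, pvPossOf, hm]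
      · have hin : PySem.Str.isIn "/" d = false := by
          rw [← Bool.not_eq_true, pv_isIn_slash]; exact hm
        simp only [parseLoopA, hd', Bool.false_eq_true, if_false, hin]
        rw [ih _ _ _ _ h2, hfd, hfn]
        have hfdd : pvFst d = d := pv_fst_no_slash d hm
        cases name <;>
          simp [pvOptsOf, pvSecOf, pvPossOf, hm, hfdd]
    · have hdf : PySem.Str.startswith d "-" = false := by
        cases hx : PySem.Str.startswith d "-"
        · rfl
        · exact absurd hx hd
      have hdcf : PySem.Chars.startswith d.toList ['-'] = false := by simpa using hdf
      have hd' : (!(PySem.Str.startswith d "-")) = true := by rw [hdf]; rfl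
      have hfd : List.filter (fun d => PySem.Str.startswith d "-") (d :: rest) =
          List.filter (fun d => PySem.Str.startswith d "-") rest :=
        List.filter_cons_of_neg (by simp [hdcf])
      have hfn : List.filter (fun d => !(PySem.Str.startswith d "-")) (d :: rest) =
          d :: List.filter (fun d => !(PySem.Str.startswith d "-")) rest :=
        List.filter_cons_of_pos hd'
      rw [hd'] at h
      cases name with
      | some n => rw [if_pos rfl] at h; simp only [Option.elim] at h; omega
      | none =>
        have h2 : ((some d).elim 0 (fun _ => 1)) +
            rest.countP (fun d => !(PySem.Str.startswith d "-")) ≤ 1 := by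
          rw [if_pos rfl] at h
          simp only [Option.elim] at h ⊢
          omega
        simp only [parseLoopA, hd', if_true]
        rw [ih _ _ _ _ h2, hfd, hfn]
        simp

-- the running "last of the longest" fold both fallbacks compute
def pvStepMax {α : Type} (key : α → Int) (b y : α) : α := if key b ≤ key y then y else b

theorem pv_key_le_fold {α : Type} (key : α → Int) (t : List α) : ∀ (b : α),
    key b ≤ key (t.foldl (pvStepMax key) b) := by
  induction t with
  | nil => intro b; simp
  | cons z t' ih =>
    intro b
    refine le_trans ?_ (ih (pvStepMax key b z))
    unfold pvStepMax
    split_ifs with h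
    · exact h
    · exact le_refl _

theorem pv_fold_seed_lt {α : Type} (key : α → Int) (t : List α) : ∀ (x y : α), key y < key x →
    t.foldl (pvStepMax key) x =
      if key (t.foldl (pvStepMax key) y) < key x then x else t.foldl (pvStepMax key) y := by
  induction t with
  | nil => intro x y h; simp [h]
  | cons z t' ih =>
    intro x y h
    by_cases hz : key x ≤ key z
    · have hx : pvStepMax key x z = z := by simp [pvStepMax, hz]
      have hy : pvStepMax key y z = z := by simp [pvStepMax, le_of_lt (lt_of_lt_of_le h hz)]
      have : ¬ key (t'.foldl (pvStepMax key) z) < key x :=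
        not_lt.mpr (le_trans hz (pv_key_le_fold key t' z))
      simp [List.foldl_cons, hx, hy, this]
    · have hx : pvStepMax key x z = x := by simp [pvStepMax, hz]
      have hw : key (pvStepMax key y z) < key x := by
        unfold pvStepMax; split_ifs
        · exact lt_of_not_ge hz
        · exact h
      simp only [List.foldl_cons, hx]
      exact ih x (pvStepMax key y z) hw

-- B's fallback: max(reversed(l), key) is the last maximal element
theorem pv_max_rev {α : Type} (key : α → Int) (t : List α) : ∀ (x : α),
    PySem.List.max? ((x :: t).reverse) key = some (t.foldl (pvStepMax key) x) := by
  induction t with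
  | nil => intro x; simp [PySem.List.max?]
  | cons y t' ih =>
    intro x
    have hrev : (x :: y :: t').reverse = (y :: t').reverse ++ [x] := by simp
    have hmax : ∀ (l : List α), PySem.List.max? l key =
        l.foldl (fun acc z => match acc with
          | none => some z
          | some m => if key m < key z then some z else some m) none := fun _ => rfl
    rw [hmax, hrev, List.foldl_append, ← hmax, ih y]
    simp only [List.foldl]
    by_cases hxy : key x ≤ key y
    · have h1 : ¬ key (t'.foldl (pvStepMax key) y) < key x :=
        not_lt.mpr (le_trans hxy (pv_key_le_fold key t' y))
      have h2 : pvStepMax key x y = y := by simp [pvStepMax, hxy]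
      simp [h1, h2]
    · have h2 : pvStepMax key x y = x := by simp [pvStepMax, hxy]
      rw [h2, pv_fold_seed_lt key t' x y (lt_of_not_ge hxy)]
      split_ifs with h3 <;> simp

theorem pv_insertBy_ne_nil {α : Type} (bef : α → α → Bool) (x : α) (l : List α) :
    PySem.List.insertBy bef x l ≠ [] := by
  cases l with
  | nil => simp [PySem.List.insertBy]
  | cons y ys =>
    simp only [PySem.List.insertBy]
    split <;> simp

theorem pv_getLast?_cons_ne {α : Type} (y : α) (l : List α) (h : l ≠ []) :
    (y :: l).getLast? = l.getLast? := by
  cases l with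
  | nil => exact absurd rfl h
  | cons a b => exact List.getLast?_cons_cons

-- A's stable insertion: the last element after inserting x
theorem pv_insertBy_getLast {α : Type} (key : α → Int) (acc : List α) (x : α)
    (h : acc.Pairwise (fun a b => key a ≤ key b)) :
    (PySem.List.insertBy (fun a b => decide (key a < key b)) x acc).getLast? =
      some (match acc.getLast? with | none => x | some z => pvStepMax key z x) := by
  induction acc with
  | nil => simp [PySem.List.insertBy]
  | cons y ys ih =>
    by_cases hxy : key x < key y
    · have hb : decide (key x < key y) = true := by simp [hxy]
      simp only [PySem.List.insertBy, hb, if_true]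
      obtain ⟨z, hz⟩ : ∃ z, (y :: ys).getLast? = some z := by
        cases h' : (y :: ys).getLast? with
        | none => simp at h'
        | some z => exact ⟨z, rfl⟩
      have hzmem : z ∈ y :: ys := List.mem_of_getLast? hz
      have hyz : key y ≤ key z := by
        rcases List.mem_cons.mp hzmem with rfl | hzys
        · exact le_refl _
        · exact (List.pairwise_cons.mp h).1 z hzys
      have hstep : pvStepMax key z x = z := by
        simp [pvStepMax, not_le.mpr (lt_of_lt_of_le hxy hyz)]
      rw [List.getLast?_cons_cons, hz]
      show some z = some (pvStepMax key z x)
      rw [hstep]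
    · have hb : decide (key x < key y) = false := by simp [not_lt.mp (fun h' => hxy h')]
      simp only [PySem.List.insertBy, hb, Bool.false_eq_true, if_false]
      rw [pv_getLast?_cons_ne _ _ (pv_insertBy_ne_nil _ x ys)]
      rw [ih (List.pairwise_cons.mp h).2]
      cases hys : ys.getLast? with
      | none =>
        have hyl : (y :: ys).getLast? = some y := by
          cases ys with
          | nil => rfl
          | cons a b => simp at hys
        rw [hyl]
        simp [pvStepMax, not_lt.mp hxy]
      | some z' =>
        have hyl : (y :: ys).getLast? = some z' := by
          cases ys with
          | nil => simp at hys
          | cons a b => rw [List.getLast?_cons_cons, hys]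
        rw [hyl]

-- A's fallback: last of the stable sort by length is the same last maximal element
theorem pv_sorted_getLast {α : Type} (key : α → Int) (l : List α) :
    (PySem.List.sorted l key false).getLast? =
      (match l with | [] => none | x :: t => some (t.foldl (pvStepMax key) x)) := by
  induction l using List.reverseRecOn with
  | nil => simp [PySem.List.sorted]
  | append_singleton l x ih =>
    rw [PySem.List.sorted_eq_foldl_insertBy, List.foldl_append, List.foldl_cons, List.foldl_nil,
      ← PySem.List.sorted_eq_foldl_insertBy]
    rw [pv_insertBy_getLast key _ x (PySem.List.sorted_pairwise l key), ih]
    cases l with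
    | nil => simp
    | cons y t => simp [List.foldl_append, pvStepMax]

-- the filtered option decls are nonempty when there is no positional name
theorem pv_all_dash_ne_nil (decls : List String) (hne : decls ≠ [])
    (hnames : decls.filter (fun d => !(PySem.Str.startswith d "-")) = []) :
    decls.filter (fun d => PySem.Str.startswith d "-") ≠ [] := by
  cases decls with
  | nil => exact absurd rfl hne
  | cons d rest =>
    intro hcon
    have h1 := List.filter_eq_nil_iff.mp hnames d (by simp)
    have h2 := List.filter_eq_nil_iff.mp hcon d (by simp)
    simp at h1 h2
    simp [h1] at h2

-- ===== VERDICT (by name: the statement is the Claim_ definition above) =====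
theorem parse_decls_py_spec : Claim_equal_parse_decls_py := by
  intro decls _hDom hPre
  obtain ⟨hne, hlen⟩ := hPre
  unfold Spec_parse_decls_py
  have hcount : decls.countP (fun d => !(PySem.Str.startswith d "-")) ≤ 1 := by
    rw [List.countP_eq_length_filter]; exact hlen
  have hloop := pv_loopA decls [] [] none [] (by simpa using hcount)
  have hnot : ¬ (decls.filter (fun d => !(PySem.Str.startswith d "-"))).length > 1 :=
    not_lt.mpr hlen
  simp only [parse_decls_py, parse_decls_py_alt]
  rw [hloop]
  simp only [if_neg hnot, pv_foldB, List.nil_append]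
  cases hnames : decls.filter (fun d => !(PySem.Str.startswith d "-")) with
  | cons n t => simp
  | nil =>
    have hods := pv_all_dash_ne_nil decls hne hnames
    cases hods' : decls.filter (fun d => PySem.Str.startswith d "-") with
    | nil => exact absurd hods' hods
    | cons d0 rest =>
      have hcons : pvPossOf (d0 :: rest) = pvLstripDash (pvFst d0) :: pvPossOf rest := rfl
      have hA := pv_sorted_getLast (fun s => PySem.Str.len s)
        (pvLstripDash (pvFst d0) :: pvPossOf rest)
      have hB := pv_max_rev (fun s => PySem.Str.len s) (pvPossOf rest) (pvLstripDash (pvFst d0))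
      simp only [List.head?_nil, hcons, PySem.List.pyGet?_neg_one, List.isEmpty_cons,
        Bool.false_eq_true, if_false]
      rw [hA, hB]
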